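-- pv_equiv track=rewrite | github.com/reinsmms/motorurl-site-framework | _tools/freecad_md_to_html.py | fallback_convert
-- ===== SOURCE A (Python) =====
-- def fallback_convert(md_text):
--     # very plain fallback: paragraphs + fenced code
--     lines = md_text.splitlines()
--     out, in_code = [], False
--     for ln in lines:
--         if ln.strip().startswith("```"):
--             in_code = not in_code
--             out.append("<pre><code>" if in_code else "</code></pre>")
--             continue
--         if in_code:
--             out.append(ln.replace("&","&amp;").replace("<","&lt;").replace(">","&gt;"))
--         else:
--             if ln.strip() == "":
--                 out.append("")
--             else:
--                 out.append(f"<p>{ln}</p>")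
--     return "\n".join(out)
-- ===== SOURCE B (Python) =====
-- def fallback_convert(md_text):
--     # Two-pass: split lines into segments at fence lines, then render each
--     # segment with the proper mode, emitting one tag line per fence.
--     lines = md_text.splitlines()
--     segs = [[]]
--     for ln in lines:
--         if ln.strip().startswith("```"):
--             segs.append([])
--         else:
--             segs[-1].append(ln)
--     parts = []
--     code = False
--     for i, seg in enumerate(segs):
--         if i > 0:
--             code = not code
--             parts.append("<pre><code>" if code else "</code></pre>")
--         if code:
--             parts.extend(ln.replace("&", "&amp;").replace("<", "&lt;").replace(">", "&gt;")
--                          for ln in seg)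
--         else:
--             parts.extend("" if ln.strip() == "" else f"<p>{ln}</p>" for ln in seg)
--     return "\n".join(parts)
-- ===== Notes on version B (the rewrite author's own statement) =====
-- stated objective: alternative
-- what changed: Replaces A's single stateful toggle loop by two passes: first split the lines into segments at fence lines, then render each segment with its mode, emitting one tag per fence.
import Mathlib
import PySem

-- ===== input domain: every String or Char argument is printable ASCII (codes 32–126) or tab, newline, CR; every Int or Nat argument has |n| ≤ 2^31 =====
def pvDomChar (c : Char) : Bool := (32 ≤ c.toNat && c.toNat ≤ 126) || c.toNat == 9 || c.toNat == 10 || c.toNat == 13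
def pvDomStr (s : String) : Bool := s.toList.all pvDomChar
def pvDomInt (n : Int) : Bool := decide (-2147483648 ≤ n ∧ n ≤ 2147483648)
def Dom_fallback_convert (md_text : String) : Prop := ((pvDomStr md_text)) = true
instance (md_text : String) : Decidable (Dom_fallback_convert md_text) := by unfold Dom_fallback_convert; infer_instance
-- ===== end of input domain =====

-- B restructures A's toggle loop into split-at-fences + render passes; same cost, different decomposition.

-- shared helpers (both Pythons use these exact expressions)
def pvFence (ln : String) : Bool := PySem.Str.startswith (PySem.Str.strip ln) "```"
def pvEsc (ln : String) : String :=
  PySem.Str.replace (PySem.Str.replace (PySem.Str.replace ln "&" "&amp;") "<" "&lt;") ">" "&gt;"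
def pvProse (ln : String) : String :=
  if PySem.Str.strip ln = "" then "" else "<p>" ++ ln ++ "</p>"

-- ===== PORT A =====
def pvStepA (st : List String × Bool) (ln : String) : List String × Bool :=
  if pvFence ln then
    (st.1 ++ [if !st.2 then "<pre><code>" else "</code></pre>"], !st.2)
  else if st.2 then (st.1 ++ [pvEsc ln], st.2)
  else (st.1 ++ [pvProse ln], st.2)

def fallback_convert (md_text : String) : String :=
  let lines := PySem.Str.splitlines md_text
  let st := lines.foldl pvStepA ([], false)
  PySem.Str.join "\n" st.1

-- ===== PORT B =====
-- pass 1: split lines into segments at fence lines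
def pvSplitSegs : List String → List (List String)
  | [] => [[]]
  | ln :: rest =>
    if pvFence ln then [] :: pvSplitSegs rest
    else
      match pvSplitSegs rest with
      | [] => [[ln]]
      | s :: ss => (ln :: s) :: ss

def pvTag (m : Bool) : String := if m then "<pre><code>" else "</code></pre>"
def pvBody (m : Bool) (seg : List String) : List String :=
  if m then seg.map pvEsc else seg.map pvProse

-- pass 2: each later segment toggles the mode and emits one tag line
def pvRenderRest (m : Bool) : List (List String) → List String
  | [] => []
  | s :: ss => pvTag (!m) :: (pvBody (!m) s ++ pvRenderRest (!m) ss)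

def fallback_convert_alt (md_text : String) : String :=
  let lines := PySem.Str.splitlines md_text
  let parts :=
    match pvSplitSegs lines with
    | [] => []
    | s :: ss => pvBody false s ++ pvRenderRest false ss
  PySem.Str.join "\n" parts

-- ===== PRECONDITION & SPEC =====
def Spec_fallback_convert (md_text : String) (out : String) : Prop := out = fallback_convert_alt md_text
instance (md_text : String) (out : String) : Decidable (Spec_fallback_convert md_text out) := by unfold Spec_fallback_convert; infer_instance

-- ===== CLAIM (what is proved, stated in full; the proofs are below) =====
def Claim_equal_fallback_convert : Prop := ∀ (md_text : String), Dom_fallback_convert md_text → Spec_fallback_convert md_text (fallback_convert md_text)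

-- ===== LEMMAS AND PROOFS =====
theorem pvSplitSegs_ne_nil (l : List String) : pvSplitSegs l ≠ [] := by
  cases l with
  | nil => simp [pvSplitSegs]
  | cons ln rest =>
    unfold pvSplitSegs
    split
    · simp
    · cases h : pvSplitSegs rest <;> simp

def pvRender (m : Bool) (segs : List (List String)) : List String :=
  match segs with
  | [] => []
  | s :: ss => pvBody m s ++ pvRenderRest m ss

theorem pvMain (lines : List String) :
    ∀ (m : Bool) (acc : List String),
      (lines.foldl pvStepA (acc, m)).1 = acc ++ pvRender m (pvSplitSegs lines) := by
  induction lines with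
  | nil => intro m acc; simp [pvSplitSegs, pvRender, pvBody, pvRenderRest]
  | cons ln rest ih =>
    intro m acc
    by_cases hf : pvFence ln = true
    · have hstep : pvStepA (acc, m) ln =
        (acc ++ [if !m then "<pre><code>" else "</code></pre>"], !m) := by
        simp [pvStepA, hf]
      rw [List.foldl_cons, hstep, ih]
      obtain ⟨s, ss, hss⟩ := List.exists_cons_of_ne_nil (pvSplitSegs_ne_nil rest)
      simp [pvSplitSegs, hf, hss, pvRender, pvRenderRest, pvBody, pvTag]
    · have hstep : pvStepA (acc, m) ln =
        (acc ++ [if m then pvEsc ln else pvProse ln], m) := by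
        cases m <;> simp [pvStepA, hf]
      rw [List.foldl_cons, hstep, ih]
      obtain ⟨s, ss, hss⟩ := List.exists_cons_of_ne_nil (pvSplitSegs_ne_nil rest)
      simp [pvSplitSegs, hf, hss, pvRender, pvBody]
      cases m <;> simp

-- ===== VERDICT (by name: the statement is the Claim_ definition above) =====
theorem fallback_convert_spec : Claim_equal_fallback_convert := by
  intro md_text _
  unfold Spec_fallback_convert fallback_convert fallback_convert_alt
  simp only []
  rw [pvMain]
  obtain ⟨s, ss, hss⟩ :=
    List.exists_cons_of_ne_nil (pvSplitSegs_ne_nil (PySem.Str.splitlines md_text))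
  simp [hss, pvRender]
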